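-- pv_equiv track=rewrite | github.com/MrBrantCode/unitest_baseline | mut_generate/mist_train_cf/cf_70199/solution.py | manage_duplicates
-- ===== SOURCE A (Python) =====
-- def manage_duplicates(lst):
--     seen = set()
--     for i, val in enumerate(lst):
--         if val in seen:
--             lst[i] = "X"
--         else:
--             seen.add(val)
--     return lst
-- ===== SOURCE B (Python) =====
-- def manage_duplicates(lst):
--     # Two-pass: build the full first-occurrence index, then mark duplicates.
--     first_index = {}
--     for i, val in enumerate(lst):
--         if val not in first_index:
--             first_index[val] = i
--     for i, val in enumerate(lst):
--         if first_index[val] != i: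
--             lst[i] = "X"
--     return lst
-- ===== Notes on version B (the rewrite author's own statement) =====
-- stated objective: alternative
-- what changed: A marks duplicates online in one pass with a growing 'seen' set; B first builds a complete value-to-first-index table in a separate pass and then marks every position whose index differs from its value's first index.
import Mathlib
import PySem

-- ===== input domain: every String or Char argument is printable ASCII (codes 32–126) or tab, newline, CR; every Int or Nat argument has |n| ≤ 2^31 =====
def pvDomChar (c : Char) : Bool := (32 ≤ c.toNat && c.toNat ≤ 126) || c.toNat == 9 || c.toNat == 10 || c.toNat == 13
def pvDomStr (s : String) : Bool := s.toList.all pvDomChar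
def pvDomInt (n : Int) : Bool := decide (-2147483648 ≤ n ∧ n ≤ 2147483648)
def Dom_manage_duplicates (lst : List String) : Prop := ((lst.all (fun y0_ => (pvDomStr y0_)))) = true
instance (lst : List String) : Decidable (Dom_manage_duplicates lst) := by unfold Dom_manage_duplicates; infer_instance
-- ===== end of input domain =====

-- B replaces A's single online pass with a growing 'seen' set by two separate passes
-- (build a complete first-occurrence index, then mark); same cost, different decomposition.
-- Both programs mutate lst in place in the same way; the equivalence is about the return value.


-- ===== PORT A =====
-- one pass: if val already in seen write "X" at this position, else add val to seen
def mdGoA (seen : PySem.Set String) : List String → List String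
  | [] => []
  | v :: rest =>
    if PySem.Set.contains seen v then "X" :: mdGoA seen rest
    else v :: mdGoA (PySem.Set.add seen v) rest

def manage_duplicates (lst : List String) : List String :=
  mdGoA PySem.Set.empty lst

-- ===== PORT B =====
-- first pass: first_index[val] = i only if val absent
def mdFirstIdx (fi : PySem.Dict String Int) (i : Int) : List String → PySem.Dict String Int
  | [] => fi
  | v :: rest => mdFirstIdx (if fi.contains v then fi else fi.insert v i) (i + 1) rest

-- second pass: lst[i] = "X" whenever first_index[val] != i
def mdMark (fi : PySem.Dict String Int) (i : Int) : List String → List String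
  | [] => []
  | v :: rest => (if fi.getD v (-1) ≠ i then "X" else v) :: mdMark fi (i + 1) rest

def manage_duplicates_alt (lst : List String) : List String :=
  mdMark (mdFirstIdx PySem.Dict.empty 0 lst) 0 lst

-- ===== PRECONDITION & SPEC =====
def Spec_manage_duplicates (lst : List String) (out : List String) : Prop := out = manage_duplicates_alt lst
instance (lst : List String) (out : List String) : Decidable (Spec_manage_duplicates lst out) := by unfold Spec_manage_duplicates; infer_instance

-- ===== CLAIM (what is proved, stated in full; the proofs are below) =====
def Claim_equal_manage_duplicates : Prop := ∀ (lst : List String), Dom_manage_duplicates lst → Spec_manage_duplicates lst (manage_duplicates lst)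

-- ===== LEMMAS AND PROOFS =====

-- the first pass computes the first-occurrence index of every value of lst
theorem mdFirstIdx_get? (lst : List String) (fi : PySem.Dict String Int) (i : Int) (v : String) :
    (mdFirstIdx fi i lst).get? v =
      if fi.contains v then fi.get? v
      else (PySem.List.index? lst v).map (fun k => i + (k : Int)) := by
  induction lst generalizing fi i with
  | nil =>
    by_cases hc : fi.contains v
    · simp [mdFirstIdx, hc]
    · have hn : fi.get? v = none := by
        cases hgv : fi.get? v with
        | none => rfl
        | some w =>
          exact absurd (by rw [PySem.Dict.contains_eq_isSome_get?, hgv]; rfl) hc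
      simp [mdFirstIdx, hc, hn]
  | cons x rest ih =>
    simp only [mdFirstIdx]
    by_cases hx : x = v
    · subst hx
      by_cases hc : fi.contains x
      · rw [if_pos hc, ih, if_pos hc, if_pos hc]
      · rw [if_neg hc, ih, if_pos (PySem.Dict.contains_insert_self fi x i), if_neg hc,
          PySem.Dict.get?_insert_self, PySem.List.index?_cons_self]
        simp
    · rw [PySem.List.index?_cons_of_ne _ hx]
      by_cases hc : fi.contains x
      · rw [if_pos hc, ih]
        by_cases hcv : fi.contains v
        · rw [if_pos hcv, if_pos hcv]
        · rw [if_neg hcv, if_neg hcv]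
          cases PySem.List.index? rest v with
          | none => rfl
          | some k => simp; ring
      · rw [if_neg hc, ih]
        have h1 : (fi.insert x i).contains v = fi.contains v := by
          rw [PySem.Dict.contains_insert]
          simp [beq_eq_false_iff_ne.mpr (Ne.symm hx)]
        have h2 : (fi.insert x i).get? v = fi.get? v :=
          PySem.Dict.get?_insert_of_ne fi i (Ne.symm hx)
        rw [h1, h2]
        by_cases hcv : fi.contains v
        · rw [if_pos hcv, if_pos hcv]
        · rw [if_neg hcv, if_neg hcv]
          cases PySem.List.index? rest v with
          | none => rfl
          | some k => simp; ring

-- adding an element to the set of a list is the set of the appended list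
theorem mdOfList_append_singleton (pre : List String) (v : String) :
    PySem.Set.ofList (pre ++ [v]) = PySem.Set.add (PySem.Set.ofList pre) v := by
  simp [PySem.Set.ofList_eq_foldl, List.foldl_append]

-- the core correspondence between A's online pass and B's mark pass
theorem mdMain (rest pre : List String) :
    mdGoA (PySem.Set.ofList pre) rest =
      mdMark (mdFirstIdx PySem.Dict.empty 0 (pre ++ rest)) (pre.length : Int) rest := by
  induction rest generalizing pre with
  | nil => simp [mdGoA, mdMark]
  | cons v t ih =>
    have happ : pre ++ v :: t = (pre ++ [v]) ++ t := by simp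
    have hget : (mdFirstIdx PySem.Dict.empty 0 (pre ++ v :: t)).get? v =
        (PySem.List.index? (pre ++ v :: t) v).map (fun k => (k : Int)) := by
      rw [mdFirstIdx_get?]; simp
    have hlen : ((pre ++ [v]).length : Int) = (pre.length : Int) + 1 := by
      simp
    have htail : mdMark (mdFirstIdx PySem.Dict.empty 0 (pre ++ v :: t)) ((pre.length : Int) + 1) t =
        mdGoA (PySem.Set.ofList (pre ++ [v])) t := by
      rw [happ, ih (pre ++ [v]), hlen]
    by_cases hv : v ∈ pre
    · -- duplicate: the first index lies strictly inside pre
      obtain ⟨k, hk⟩ := Option.isSome_iff_exists.mp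
        ((PySem.List.index?_isSome_iff pre v).mpr hv)
      have hklt : k < pre.length := by
        obtain ⟨p, s, hps, hplen, -⟩ := (PySem.List.index?_eq_some_iff pre v k).mp hk
        rw [hps, ← hplen]; simp
      have hidx : PySem.List.index? (pre ++ v :: t) v = some k := by
        rw [PySem.List.index?_append_of_mem _ hv, hk]
      have hg : (mdFirstIdx PySem.Dict.empty 0 (pre ++ v :: t)).getD v (-1) = (k : Int) := by
        rw [PySem.Dict.getD_eq_get?_getD, hget, hidx]; rfl
      have hcond : ((k : Int) ≠ (pre.length : Int)) := by exact_mod_cast Nat.ne_of_lt hklt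
      have hmem : (PySem.Set.ofList pre).contains v = true :=
        (PySem.Set.contains_iff _ _).mpr ((PySem.Set.mem_ofList pre v).mpr hv)
      have hsame : PySem.Set.ofList (pre ++ [v]) = PySem.Set.ofList pre := by
        rw [mdOfList_append_singleton]
        show (if (PySem.Set.ofList pre).contains v then _ else _) = _
        rw [if_pos hmem]
      have htail2 : mdMark (mdFirstIdx PySem.Dict.empty 0 (pre ++ v :: t)) ((pre.length : Int) + 1) t =
          mdGoA (PySem.Set.ofList pre) t := by rw [htail, hsame]
      simp only [mdGoA, mdMark, hmem, if_pos, hg]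
      rw [if_pos hcond, htail2]
    · -- first occurrence: the first index is exactly pre.length
      have hidx : PySem.List.index? (pre ++ v :: t) v = some pre.length := by
        rw [happ, PySem.List.index?_append_of_mem _ (by simp),
          PySem.List.index?_append_singleton_self pre v hv]
      have hg : (mdFirstIdx PySem.Dict.empty 0 (pre ++ v :: t)).getD v (-1) = (pre.length : Int) := by
        rw [PySem.Dict.getD_eq_get?_getD, hget, hidx]; rfl
      have hmem : (PySem.Set.ofList pre).contains v = false := by
        rw [Bool.eq_false_iff]
        intro h
        exact hv ((PySem.Set.mem_ofList pre v).mp ((PySem.Set.contains_iff _ _).mp h))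
      simp only [mdGoA, mdMark, hmem, Bool.false_eq_true, hg, ne_eq, not_true_eq_false, if_false]
      rw [htail, ← mdOfList_append_singleton]

-- ===== VERDICT (by name: the statement is the Claim_ definition above) =====
theorem manage_duplicates_spec : Claim_equal_manage_duplicates := by
  intro lst _
  show manage_duplicates lst = manage_duplicates_alt lst
  have h := mdMain lst []
  simpa [manage_duplicates, manage_duplicates_alt, PySem.Set.empty,
    PySem.Set.ofList_eq_foldl] using h
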